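-- pv_equiv track=rewrite | github.com/RideGreg/LintCode | Python/1379-the-longest-scene.py | getLongestScene
-- ===== SOURCE A (Python) =====
-- def getLongestScene(str):
--     seg = [[len(str), -1] for _ in range(26)] # [firstPosition, lastPosition]
--     for i in range(len(str)):
--         t = ord(str[i]) - ord('a')
--         seg[t][0] = min(seg[t][0], i)
--         seg[t][1] = max(seg[t][1], i)
--     seg.sort()
--
--     # merge interval
--     ans = seg[0][1] - seg[0][0] + 1
--     l, r = seg[0]
--     for i in range(len(seg)):
--         if seg[i][0] < len(str) and seg[i][1] >= 0 :
--             if seg[i][0] <= r: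
--                 r = max(r, seg[i][1])
--             else:
--                 l, r = seg[i]
--             ans = max(ans, r - l + 1)
--     return ans
-- ===== SOURCE B (Python) =====
-- def getLongestScene(str):
--     # partition-labels single sweep: last-occurrence table, then one pass; no sort, no interval list
--     last = [-1] * 26
--     for i in range(len(str)):
--         last[ord(str[i]) - ord('a')] = i
--     ans = start = end = 0
--     for i in range(len(str)):
--         end = max(end, last[ord(str[i]) - ord('a')])
--         if i == end:
--             ans = max(ans, i - start + 1)
--             start = i + 1
--     return ans
-- ===== Notes on version B (the rewrite author's own statement) =====
-- stated objective: simpler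
-- what changed: Replaced the 26-interval table + lexicographic sort + interval-merge scan by the partition-labels algorithm: one pass fills a 26-entry last-occurrence table, then a single sweep keeps a running maximum of the last occurrences and closes a block when the index reaches that maximum; no sorting and no interval list.
import Mathlib
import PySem

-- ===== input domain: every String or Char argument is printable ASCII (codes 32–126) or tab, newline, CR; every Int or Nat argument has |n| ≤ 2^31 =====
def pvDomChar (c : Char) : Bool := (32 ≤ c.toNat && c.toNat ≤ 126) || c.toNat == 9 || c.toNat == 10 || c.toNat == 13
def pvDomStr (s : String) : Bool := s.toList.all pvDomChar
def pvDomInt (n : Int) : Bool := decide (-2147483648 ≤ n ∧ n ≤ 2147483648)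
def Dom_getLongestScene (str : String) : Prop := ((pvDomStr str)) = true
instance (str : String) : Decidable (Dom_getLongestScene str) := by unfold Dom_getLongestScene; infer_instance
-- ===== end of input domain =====

-- B replaces A's 26-interval table + lexicographic sort + interval merge by the partition-labels
-- single sweep (last-occurrence table, running maximum, close a block when i == end); objective: simpler.

-- ===== PORT A =====
-- A-side helper: A's body over the character list (Python reads `str` only via len and indexing).
def getLongestSceneCore (cs : List Char) : Int :=
  let n : Int := PySem.List.len cs
  -- seg = [[len(str), -1] for _ in range(26)]
  let seg0 : List (Int × Int) := (PySem.List.pyRange 0 26 1).map (fun _ => (n, -1))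
  -- for i in range(len(str)): t = ord(str[i]) - ord('a'); seg[t][0] = min(...); seg[t][1] = max(...)
  let seg := (PySem.List.pyRange 0 n 1).foldl (fun sg i =>
      let t : Int := ((PySem.List.pyGetD cs i ' ').toNat : Int) - 97
      let p := PySem.List.pyGetD sg t ((0 : Int), (0 : Int))
      PySem.List.pySetD sg t (min p.1 i, max p.2 i)) seg0
  -- seg.sort()  (lists of length 2 compare lexicographically)
  let sseg := PySem.List.sorted2 seg (fun p => p.1) (fun p => p.2)
  -- ans = seg[0][1] - seg[0][0] + 1; l, r = seg[0]
  let p0 := PySem.List.pyGetD sseg 0 ((0 : Int), (0 : Int))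
  -- for i in range(len(seg)): merge intervals, state (l, r, ans)
  let res := (PySem.List.pyRange 0 26 1).foldl (fun (st : Int × Int × Int) i =>
      let p := PySem.List.pyGetD sseg i ((0 : Int), (0 : Int))
      if p.1 < n ∧ 0 ≤ p.2 then
        if p.1 ≤ st.2.1 then
          (st.1, max st.2.1 p.2, max st.2.2 (max st.2.1 p.2 - st.1 + 1))
        else (p.1, p.2, max st.2.2 (p.2 - p.1 + 1))
      else st) (p0.1, p0.2, p0.2 - p0.1 + 1)
  res.2.2

def getLongestScene (str : String) : Int := getLongestSceneCore str.toList

-- ===== PORT B =====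
-- B-side helper: B's body over the character list.
def getLongestSceneAltCore (cs : List Char) : Int :=
  let n : Int := PySem.List.len cs
  -- last = [-1] * 26; for i in range(len(str)): last[ord(str[i]) - ord('a')] = i
  let last := (PySem.List.pyRange 0 n 1).foldl (fun la i =>
      PySem.List.pySetD la (((PySem.List.pyGetD cs i ' ').toNat : Int) - 97) i)
    (PySem.List.pyRepeat [(-1 : Int)] 26)
  -- ans = start = end = 0; sweep, state (ans, start, end)
  let res := (PySem.List.pyRange 0 n 1).foldl (fun (st : Int × Int × Int) i =>
      let e := max st.2.2 (PySem.List.pyGetD last (((PySem.List.pyGetD cs i ' ').toNat : Int) - 97) 0)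
      if i = e then (max st.1 (i - st.2.1 + 1), i + 1, e) else (st.1, st.2.1, e)) (0, 0, 0)
  res.1

def getLongestScene_alt (str : String) : Int := getLongestSceneAltCore str.toList

-- ===== PRECONDITION & SPEC =====
-- Pre_ excludes exactly the inputs on which A raises IndexError: a character whose code is outside
-- [71, 122] ('G'..'z') yields a 26-list index outside [-26, 25].  (B raises there as well.)
def Pre_getLongestScene (str : String) : Prop :=
  (str.toList.all (fun c => 71 ≤ c.toNat && c.toNat ≤ 122)) = true
instance (str : String) : Decidable (Pre_getLongestScene str) := by unfold Pre_getLongestScene; infer_instance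
def pvWitness_getLongestScene : String := "abcab"
def Spec_getLongestScene (str : String) (out : Int) : Prop := out = getLongestScene_alt str
instance (str : String) (out : Int) : Decidable (Spec_getLongestScene str out) := by unfold Spec_getLongestScene; infer_instance

-- ===== CLAIM (what is proved, stated in full; the proofs are below) =====
def Claim_equal_getLongestScene : Prop := ∀ (str : String), Dom_getLongestScene str → Pre_getLongestScene str → Spec_getLongestScene str (getLongestScene str)

-- ===== LEMMAS AND PROOFS =====

-- The effective 26-class index Python's wrapping negative list index produces for a char in 'G'..'z'.
def clsC (c : Char) : Nat := (c.toNat - 71) % 26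
-- First / last occurrence of class j (length resp. -1 when absent).
def Fi (cl : List Nat) (j : Nat) : Int := (cl.idxOf j : Int)
def Li (cl : List Nat) (j : Nat) : Int := (cl.length : Int) - 1 - (cl.reverse.idxOf j : Int)
def tbl (cl : List Nat) (j : Nat) : Int × Int := (Fi cl j, Li cl j)
-- The occurring intervals in order of first occurrence (= A's sorted list minus the empty slots).
def Ilist (cl : List Nat) : List (Int × Int) := (PySem.List.dedup cl).map (tbl cl)
def mergeStep (s : Int × Int × Int) (p : Int × Int) : Int × Int × Int :=
  if p.1 ≤ s.2.1 then (s.1, max s.2.1 p.2, max s.2.2 (max s.2.1 p.2 - s.1 + 1))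
  else (p.1, p.2, max s.2.2 (p.2 - p.1 + 1))
def mergeRun (cl : List Nat) (m : Nat) : Int × Int × Int :=
  ((Ilist cl).take m).foldl mergeStep
    (((Ilist cl).headD (0, 0)).1, ((Ilist cl).headD (0, 0)).2,
      ((Ilist cl).headD (0, 0)).2 - ((Ilist cl).headD (0, 0)).1 + 1)
def lst (cl : List Nat) (q : Nat) : Int := Li cl (cl.getD q 0)
def sweepStep (cl : List Nat) (s : Int × Int × Int) (q : Nat) : Int × Int × Int :=
  if (q : Int) = max s.2.2 (lst cl q) then
    (max s.1 ((q : Int) - s.2.1 + 1), (q : Int) + 1, max s.2.2 (lst cl q))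
  else (s.1, s.2.1, max s.2.2 (lst cl q))
def sweepRun (cl : List Nat) (p : Nat) : Int × Int × Int := (List.range p).foldl (sweepStep cl) (0, 0, 0)

-- ---- small list helpers ----
lemma getD_set' {α : Type} (l : List α) (i : Nat) (v : α) (j : Nat) (d : α)
    (hi : i < l.length) (hj : j < l.length) :
    (l.set i v).getD j d = if i = j then v else l.getD j d := by
  have hj' : j < (l.set i v).length := by simpa using hj
  rw [List.getD_eq_getElem _ d hj', List.getD_eq_getElem _ d hj, List.getElem_set]

lemma foldl_fix {α β : Type} (l : List α) (f : β → α → β) (s : β)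
    (h : ∀ s, ∀ x ∈ l, f s x = s) : l.foldl f s = s := by
  induction l generalizing s with
  | nil => rfl
  | cons x t ih => simp only [List.foldl_cons, h s x (by simp)]; exact ih s (fun s x hx => h s x (by simp [hx]))

lemma idxOf_lt_of_mem_take {l : List Nat} {m j : Nat} (h : j ∈ l.take m) : l.idxOf j < m := by
  have h2 := List.idxOf_append_of_mem (l₂ := l.drop m) h
  rw [List.take_append_drop] at h2
  rw [h2]
  exact lt_of_lt_of_le (List.idxOf_lt_length_of_mem h) (by simp)

lemma idxOf_le_of_getElem {l : List Nat} {i j : Nat} (hi : i < l.length) (hj : l[i] = j) :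
    l.idxOf j ≤ i := by
  have hmem : j ∈ l.take (i+1) := by
    rw [List.take_succ_eq_append_getElem hi]; simp [hj]
  exact Nat.lt_succ_iff.mp (idxOf_lt_of_mem_take hmem)

lemma idxOf_eq_of_not_mem_take {l : List Nat} {m j : Nat} (hm : m < l.length) (hj : l[m] = j)
    (h : j ∉ l.take m) : l.idxOf j = m := by
  have hsplit : l = l.take m ++ (j :: l.drop (m+1)) := by
    conv_lhs => rw [← List.take_append_drop m l]
    rw [List.drop_eq_getElem_cons hm, hj]
  conv_lhs => rw [hsplit]
  rw [List.idxOf_append]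
  simp [h, List.idxOf_cons_self]
  omega

-- ---- Fi / Li facts ----
lemma Fi_lt_len {cl : List Nat} {j : Nat} (h : j ∈ cl) : Fi cl j < (cl.length : Int) := by
  unfold Fi
  exact_mod_cast List.idxOf_lt_length_of_mem h

lemma Fi_absent {cl : List Nat} {j : Nat} (h : j ∉ cl) : Fi cl j = (cl.length : Int) := by
  unfold Fi
  rw [List.idxOf_eq_length h]

lemma Li_absent {cl : List Nat} {j : Nat} (h : j ∉ cl) : Li cl j = -1 := by
  unfold Li
  rw [List.idxOf_eq_length (by simpa using h)]
  simp

lemma Li_nonneg {cl : List Nat} {j : Nat} (h : j ∈ cl) : 0 ≤ Li cl j := by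
  have h2 : cl.reverse.idxOf j < cl.length := by
    simpa using List.idxOf_lt_length_of_mem (show j ∈ cl.reverse by simpa using h)
  unfold Li
  omega

lemma Li_le {cl : List Nat} (j : Nat) : Li cl j ≤ (cl.length : Int) - 1 := by
  unfold Li
  have := Nat.zero_le (cl.reverse.idxOf j)
  omega

lemma le_Li_of_getElem {cl : List Nat} {i j : Nat} (hi : i < cl.length) (hj : cl[i] = j) :
    (i : Int) ≤ Li cl j := by
  have hlt : cl.length - 1 - i < cl.reverse.length := by simp; omega
  have hr : cl.reverse.idxOf j ≤ cl.length - 1 - i := by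
    apply idxOf_le_of_getElem hlt
    rw [List.getElem_reverse]
    have he : cl.length - 1 - (cl.length - 1 - i) = i := by omega
    simp only [he, hj]
  unfold Li
  omega

-- ---- dedup facts ----
lemma dedup_snoc (l : List Nat) (x : Nat) :
    PySem.List.dedup (l ++ [x]) =
      if x ∈ PySem.List.dedup l then PySem.List.dedup l else PySem.List.dedup l ++ [x] := by
  rw [PySem.List.dedup_eq_ofList, PySem.Set.ofList_eq_foldl, List.foldl_append]
  rw [← PySem.Set.ofList_eq_foldl, ← PySem.List.dedup_eq_ofList]
  simp only [List.foldl_cons, List.foldl_nil]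
  by_cases hx : x ∈ PySem.List.dedup l <;>
    simp [PySem.Set.add, PySem.Set.contains, List.contains_iff_mem, hx]

lemma dedup_prefix (l t : List Nat) : PySem.List.dedup l <+: PySem.List.dedup (l ++ t) := by
  induction t using List.reverseRecOn with
  | nil => simp
  | append_singleton t x ih =>
    rw [← List.append_assoc, dedup_snoc]
    split
    · exact ih
    · exact ih.trans (List.prefix_append _ _)

lemma dedup_take_eq (cl : List Nat) (p : Nat) :
    PySem.List.dedup (cl.take p) =
      (PySem.List.dedup cl).take ((PySem.List.dedup (cl.take p)).length) := by
  apply List.prefix_iff_eq_take.mp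
  have := dedup_prefix (cl.take p) (cl.drop p)
  rwa [List.take_append_drop] at this

lemma dedup_pairwise_idxOf (l : List Nat) :
    (PySem.List.dedup l).Pairwise (fun a b => l.idxOf a < l.idxOf b) := by
  induction l using List.reverseRecOn with
  | nil => simp [PySem.List.dedup_eq_ofList, PySem.Set.ofList_eq_foldl]
  | append_singleton l x ih =>
    have hmem : ∀ a, a ∈ PySem.List.dedup l → a ∈ l := by
      intro a ha
      rw [PySem.List.dedup_eq_ofList] at ha
      exact (PySem.Set.mem_ofList _ _).mp ha
    rw [dedup_snoc]
    by_cases hx : x ∈ PySem.List.dedup l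
    · simp only [hx, if_true]
      refine List.Pairwise.imp_of_mem ?_ ih
      intro a b ha hb hab
      rw [List.idxOf_append_of_mem (hmem a ha), List.idxOf_append_of_mem (hmem b hb)]
      exact hab
    · have hx' : x ∉ l := fun hc => hx (by
        rw [PySem.List.dedup_eq_ofList]; exact (PySem.Set.mem_ofList _ _).mpr hc)
      simp only [hx, if_false]
      rw [List.pairwise_append]
      refine ⟨?_, by simp, ?_⟩
      · refine List.Pairwise.imp_of_mem ?_ ih
        intro a b ha hb hab
        rw [List.idxOf_append_of_mem (hmem a ha), List.idxOf_append_of_mem (hmem b hb)]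
        exact hab
      · intro a ha b hb
        simp at hb
        subst hb
        rw [List.idxOf_append_of_mem (hmem a ha)]
        have h1 : l.idxOf a < l.length := List.idxOf_lt_length_of_mem (hmem a ha)
        have h2 : (l ++ [b]).idxOf b = l.length := by
          rw [List.idxOf_append]
          simp [hx']
        omega

-- ---- index wrap (negative Python index on a 26-list) ----
lemma pySetD_wrap {α : Type} (xs : List α) (h : xs.length = 26) {u : Nat}
    (h1 : 71 ≤ u) (h2 : u ≤ 122) (v : α) :
    PySem.List.pySetD xs ((u : Int) - 97) v = xs.set ((u - 71) % 26) v := by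
  unfold PySem.List.pySetD PySem.List.pySet? PySem.List.pyIdx?
  rcases Nat.lt_or_ge u 97 with hu | hu
  · have c1 : ¬ (0 ≤ (u : Int) - 97) := by omega
    have c2 : -(xs.length : Int) ≤ (u : Int) - 97 := by omega
    have hidx : xs.length - (-((u : Int) - 97)).toNat = (u - 71) % 26 := by
      rw [h]; omega
    simp only [c1, if_false, c2, if_true, hidx, Option.map_some, Option.getD_some]
  · have c1 : (0 : Int) ≤ (u : Int) - 97 := by omega
    have c2 : (u : Int) - 97 < (xs.length : Int) := by omega
    have hidx : ((u : Int) - 97).toNat = (u - 71) % 26 := by omega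
    simp only [c1, if_true, c2, hidx, Option.map_some, Option.getD_some]

lemma pyGetD_wrap {α : Type} (xs : List α) (h : xs.length = 26) {u : Nat}
    (h1 : 71 ≤ u) (h2 : u ≤ 122) (d : α) :
    PySem.List.pyGetD xs ((u : Int) - 97) d = xs.getD ((u - 71) % 26) d := by
  unfold PySem.List.pyGetD PySem.List.pyGet? PySem.List.pyIdx?
  rcases Nat.lt_or_ge u 97 with hu | hu
  · have c1 : ¬ (0 ≤ (u : Int) - 97) := by omega
    have c2 : -(xs.length : Int) ≤ (u : Int) - 97 := by omega
    have hidx : xs.length - (-((u : Int) - 97)).toNat = (u - 71) % 26 := by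
      rw [h]; omega
    simp only [c1, if_false, c2, if_true, hidx, Option.bind_some, List.getD_eq_getElem?_getD]
  · have c1 : (0 : Int) ≤ (u : Int) - 97 := by omega
    have c2 : (u : Int) - 97 < (xs.length : Int) := by omega
    have hidx : ((u : Int) - 97).toNat = (u - 71) % 26 := by omega
    simp only [c1, if_true, c2, hidx, Option.bind_some, List.getD_eq_getElem?_getD]

-- ---- the table-building folds, pointwise ----
lemma table_fold {α : Type} (d : α) (u : Nat → Nat) (g : α → Nat → α) :
    ∀ (ks : List Nat) (init : List α) (j : Nat), init.length = 26 → j < 26 →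
    (∀ k ∈ ks, 71 ≤ u k ∧ u k ≤ 122) →
    (ks.foldl (fun s k => PySem.List.pySetD s ((u k : Int) - 97)
        (g (PySem.List.pyGetD s ((u k : Int) - 97) d) k)) init).getD j d
      = ks.foldl (fun a k => if (u k - 71) % 26 = j then g a k else a) (init.getD j d) := by
  intro ks
  induction ks with
  | nil => intro init j _ _ _; rfl
  | cons k ks ih =>
    intro init j h26 hj hk
    have hu1 := (hk k (by simp)).1
    have hu2 := (hk k (by simp)).2
    simp only [List.foldl_cons]
    rw [pySetD_wrap init h26 hu1 hu2, pyGetD_wrap init h26 hu1 hu2]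
    rw [ih _ j (by simpa using h26) hj (fun k hk' => hk k (by simp [hk']))]
    congr 1
    rw [getD_set' init _ _ j d (by rw [h26]; exact Nat.mod_lt _ (by norm_num)) (by rw [h26]; exact hj)]
    by_cases hc : (u k - 71) % 26 = j <;> simp [hc]

lemma table_fold_length {α : Type} (d : α) (u : Nat → Nat) (g : α → Nat → α)
    (ks : List Nat) (init : List α) :
    (ks.foldl (fun s k => PySem.List.pySetD s ((u k : Int) - 97)
        (g (PySem.List.pyGetD s ((u k : Int) - 97) d) k)) init).length = init.length := by
  induction ks generalizing init with
  | nil => rfl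
  | cons k ks ih =>
    simp only [List.foldl_cons]
    rw [ih]
    exact PySem.List.length_pySetD _ _ _

-- ---- per-class folds, closed forms ----
lemma minFold (cl : List Nat) (j : Nat) :
    ∀ m ≤ cl.length, (List.range m).foldl
        (fun a k => if cl.getD k 0 = j then min a (k : Int) else a) (cl.length : Int)
      = if j ∈ cl.take m then Fi cl j else (cl.length : Int) := by
  intro m
  induction m with
  | zero => intro _; simp
  | succ m ih =>
    intro hm1
    have hm : m < cl.length := hm1
    rw [List.range_succ, List.foldl_append, ih (Nat.le_of_lt hm)]
    simp only [List.foldl_cons, List.foldl_nil]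
    rw [List.getD_eq_getElem cl 0 hm, List.take_succ_eq_append_getElem hm]
    by_cases hh : cl[m] = j
    · simp only [hh, if_true]
      by_cases ht : j ∈ cl.take m
      · have h1 : cl.idxOf j < m := idxOf_lt_of_mem_take ht
        simp only [ht, if_true, List.mem_append, List.mem_singleton, true_or, if_true]
        unfold Fi
        omega
      · have h1 : cl.idxOf j = m := idxOf_eq_of_not_mem_take hm hh ht
        simp only [ht, if_false, List.mem_append, List.mem_singleton]
        simp only [hh, or_true, if_true]
        unfold Fi
        omega
    · simp only [hh, if_false]
      have hmm : (j ∈ cl.take m ++ [cl[m]]) ↔ j ∈ cl.take m := by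
        simp only [List.mem_append, List.mem_singleton]
        constructor
        · rintro (h | h)
          · exact h
          · exact absurd h.symm hh
        · intro h
          exact Or.inl h
      simp only [hmm]

lemma maxFold (cl : List Nat) (j : Nat) :
    ∀ m ≤ cl.length, (List.range m).foldl
        (fun a k => if cl.getD k 0 = j then max a (k : Int) else a) (-1)
      = if j ∈ cl.take m then (m : Int) - 1 - (((cl.take m).reverse.idxOf j : Nat) : Int) else -1 := by
  intro m
  induction m with
  | zero => intro _; simp
  | succ m ih =>
    intro hm1
    have hm : m < cl.length := hm1
    rw [List.range_succ, List.foldl_append, ih (Nat.le_of_lt hm)]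
    simp only [List.foldl_cons, List.foldl_nil]
    rw [List.getD_eq_getElem cl 0 hm, List.take_succ_eq_append_getElem hm]
    by_cases hh : cl[m] = j
    · simp only [hh, if_true]
      have hmem2 : j ∈ cl.take m ++ [cl[m]] := by simp [hh]
      rw [List.reverse_concat]
      subst hh
      simp only [hmem2, if_true, List.idxOf_cons_self]
      by_cases ht : cl[m] ∈ cl.take m
      · have h0 : (cl.take m).reverse.idxOf cl[m] < (cl.take m).reverse.length :=
          List.idxOf_lt_length_of_mem (by simpa using ht)
        simp only [ht, if_true]
        simp at h0
        push_cast
        omega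
      · simp only [ht, if_false]
        push_cast
        omega
    · simp only [hh, if_false]
      have hmm : (j ∈ cl.take m ++ [cl[m]]) ↔ j ∈ cl.take m := by
        simp only [List.mem_append, List.mem_singleton]
        constructor
        · rintro (h | h)
          · exact h
          · exact absurd h.symm hh
        · intro h
          exact Or.inl h
      by_cases ht : j ∈ cl.take m
      · simp only [hmm, ht, if_true]
        rw [List.reverse_concat, List.idxOf_cons_ne _ hh]
        push_cast
        omega
      · simp only [hmm, ht, if_false]

lemma setFold (cl : List Nat) (j : Nat) :
    ∀ m ≤ cl.length, (List.range m).foldl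
        (fun a k => if cl.getD k 0 = j then (k : Int) else a) (-1)
      = if j ∈ cl.take m then (m : Int) - 1 - (((cl.take m).reverse.idxOf j : Nat) : Int) else -1 := by
  intro m
  induction m with
  | zero => intro _; simp
  | succ m ih =>
    intro hm1
    have hm : m < cl.length := hm1
    rw [List.range_succ, List.foldl_append, ih (Nat.le_of_lt hm)]
    simp only [List.foldl_cons, List.foldl_nil]
    rw [List.getD_eq_getElem cl 0 hm, List.take_succ_eq_append_getElem hm]
    by_cases hh : cl[m] = j
    · simp only [hh, if_true]
      have hmem2 : j ∈ cl.take m ++ [cl[m]] := by simp [hh]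
      rw [List.reverse_concat]
      subst hh
      simp only [hmem2, if_true, List.idxOf_cons_self]
      push_cast
      omega
    · simp only [hh, if_false]
      have hmm : (j ∈ cl.take m ++ [cl[m]]) ↔ j ∈ cl.take m := by
        simp only [List.mem_append, List.mem_singleton]
        constructor
        · rintro (h | h)
          · exact h
          · exact absurd h.symm hh
        · intro h
          exact Or.inl h
      by_cases ht : j ∈ cl.take m
      · simp only [hmm, ht, if_true]
        rw [List.reverse_concat, List.idxOf_cons_ne _ hh]
        push_cast
        omega
      · simp only [hmm, ht, if_false]

-- ---- plumbing: pyRange folds, small facts ----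
lemma foldl_pyRange_len {β : Type} (cs : List Char) (f : β → Int → β) (init : β) :
    (PySem.List.pyRange 0 (PySem.List.len cs) 1).foldl f init
      = (List.range cs.length).foldl (fun s (k : Nat) => f s (k : Int)) init := by
  rw [PySem.List.len_eq, PySem.List.pyRange_zero_nat, List.foldl_map]

lemma clsC_lt (c : Char) : clsC c < 26 := Nat.mod_lt _ (by norm_num)

lemma cl_getD (cs : List Char) {k : Nat} (hk : k < cs.length) :
    (cs.map clsC).getD k 0 = clsC (cs.getD k ' ') := by
  rw [List.getD_eq_getElem _ _ (by simpa using hk), List.getD_eq_getElem _ _ hk, List.getElem_map]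

lemma pw_replicate {α : Type} (R : α → α → Prop) (x : α) (h : R x x) (n : Nat) :
    (List.replicate n x).Pairwise R := by
  induction n with
  | zero => simp
  | succ n ih =>
    rw [List.replicate_succ]
    exact List.Pairwise.cons (fun b hb => by rw [List.eq_of_mem_replicate hb]; exact h) ih

lemma nodup_length_le {l₁ l₂ : List Nat} (h : l₁.Nodup) (hs : ∀ x ∈ l₁, x ∈ l₂) :
    l₁.length ≤ l₂.length := by
  calc l₁.length = l₁.toFinset.card := (List.toFinset_card_of_nodup h).symm
    _ ≤ l₂.toFinset.card := Finset.card_le_card (fun x hx => by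
        rw [List.mem_toFinset] at hx ⊢; exact hs x hx)
    _ ≤ l₂.length := List.toFinset_card_le l₂

lemma dedup_ne_nil {l : List Nat} (h : l ≠ []) : PySem.List.dedup l ≠ [] := by
  intro hc
  have := (PySem.Set.mem_ofList l (l.head h)).mpr (List.head_mem h)
  rw [← PySem.List.dedup_eq_ofList, hc] at this
  simp at this

lemma mem_dedup_mem {l : List Nat} {j : Nat} (h : j ∈ PySem.List.dedup l) : j ∈ l := by
  rw [PySem.List.dedup_eq_ofList] at h
  exact (PySem.Set.mem_ofList _ _).mp h

lemma mem_mem_dedup {l : List Nat} {j : Nat} (h : j ∈ l) : j ∈ PySem.List.dedup l := by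
  rw [PySem.List.dedup_eq_ofList]
  exact (PySem.Set.mem_ofList _ _).mpr h

lemma cls_mem_lt {cs : List Char} {j : Nat} (h : j ∈ cs.map clsC) : j < 26 := by
  obtain ⟨c, _, rfl⟩ := List.mem_map.mp h
  exact clsC_lt c

-- ---- characterization of the two table-building loops ----
lemma segA_eq (cs : List Char) (hpre : ∀ c ∈ cs, 71 ≤ c.toNat ∧ c.toNat ≤ 122) :
    (PySem.List.pyRange 0 (PySem.List.len cs) 1).foldl (fun sg i =>
        PySem.List.pySetD sg (((PySem.List.pyGetD cs i ' ').toNat : Int) - 97)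
          (min (PySem.List.pyGetD sg (((PySem.List.pyGetD cs i ' ').toNat : Int) - 97) ((0:Int),(0:Int))).1 i,
           max (PySem.List.pyGetD sg (((PySem.List.pyGetD cs i ' ').toNat : Int) - 97) ((0:Int),(0:Int))).2 i))
      ((PySem.List.pyRange 0 26 1).map (fun _ => (PySem.List.len cs, (-1 : Int))))
    = (List.range 26).map (tbl (cs.map clsC)) := by
  rw [foldl_pyRange_len]
  simp only [PySem.List.pyGetD_natCast, PySem.List.len_eq]
  have hinit : ((PySem.List.pyRange 0 26 1).map
      (fun _ => ((cs.length : Int), (-1 : Int)))).length = 26 := by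
    simp [PySem.List.length_pyRange_one]
  have hlen := table_fold_length ((0,0) : Int × Int) (fun k => (cs.getD k ' ').toNat)
      (fun p k => (min p.1 (k : Int), max p.2 (k : Int))) (List.range cs.length)
      ((PySem.List.pyRange 0 26 1).map (fun _ => ((cs.length : Int), (-1 : Int))))
  apply List.ext_getElem
  · rw [hlen, hinit]; simp
  · intro j hj1 hj2
    have hj : j < 26 := by rw [hlen, hinit] at hj1; exact hj1
    have hk : ∀ k ∈ List.range cs.length, 71 ≤ (cs.getD k ' ').toNat ∧ (cs.getD k ' ').toNat ≤ 122 := by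
      intro k hkm
      have hklt : k < cs.length := List.mem_range.mp hkm
      rw [List.getD_eq_getElem _ _ hklt]
      exact hpre _ (List.getElem_mem hklt)
    have htf := table_fold ((0,0) : Int × Int) (fun k => (cs.getD k ' ').toNat)
        (fun p k => (min p.1 (k : Int), max p.2 (k : Int))) (List.range cs.length)
        ((PySem.List.pyRange 0 26 1).map (fun _ => ((cs.length : Int), (-1 : Int)))) j
        hinit hj hk
    rw [← List.getD_eq_getElem _ ((0,0) : Int × Int) hj1, htf]
    have hinitD : ((PySem.List.pyRange 0 26 1).map
        (fun _ => ((cs.length : Int), (-1 : Int)))).getD j ((0,0) : Int × Int)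
        = ((cs.length : Int), (-1 : Int)) := by
      rw [List.getD_eq_getElem _ _ (by rw [hinit]; exact hj), List.getElem_map]
    rw [hinitD]
    -- switch the condition to the class list, and split the pair fold
    have hcongr := PySem.List.foldl_congr_mem
      (l := List.range cs.length)
      (f := fun (a : Int × Int) (k : Nat) =>
        if ((cs.getD k ' ').toNat - 71) % 26 = j then (min a.1 (k : Int), max a.2 (k : Int)) else a)
      (g := fun (a : Int × Int) (k : Nat) =>
        (if (cs.map clsC).getD k 0 = j then min a.1 (k : Int) else a.1,
         if (cs.map clsC).getD k 0 = j then max a.2 (k : Int) else a.2))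
      (init := ((cs.length : Int), (-1 : Int)))
      (by
        intro a k hkm
        have hklt : k < cs.length := List.mem_range.mp hkm
        show (if ((cs.getD k ' ').toNat - 71) % 26 = j then (min a.1 (k:Int), max a.2 (k:Int)) else a)
          = (if (cs.map clsC).getD k 0 = j then min a.1 (k:Int) else a.1,
             if (cs.map clsC).getD k 0 = j then max a.2 (k:Int) else a.2)
        rw [cl_getD cs hklt]
        unfold clsC
        split <;> rfl)
    rw [hcongr, PySem.List.foldl_prod_mk
      (f := fun (x : Int) (k : Nat) => if (cs.map clsC).getD k 0 = j then min x (k : Int) else x)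
      (g := fun (x : Int) (k : Nat) => if (cs.map clsC).getD k 0 = j then max x (k : Int) else x)]
    have hlencl : cs.length = (cs.map clsC).length := by simp
    rw [List.getElem_map, List.getElem_range]
    unfold tbl
    have hmin := minFold (cs.map clsC) j (cs.map clsC).length (le_refl _)
    have hmax := maxFold (cs.map clsC) j (cs.map clsC).length (le_refl _)
    rw [List.take_length] at hmin hmax
    rw [hlencl, hmin, hmax]
    by_cases hmem : j ∈ cs.map clsC
    · simp only [hmem, if_true]
      unfold Li
      rfl
    · simp only [hmem, if_false]
      rw [Fi_absent hmem, Li_absent hmem]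

lemma lastB_eq (cs : List Char) (hpre : ∀ c ∈ cs, 71 ≤ c.toNat ∧ c.toNat ≤ 122) :
    (PySem.List.pyRange 0 (PySem.List.len cs) 1).foldl (fun la i =>
        PySem.List.pySetD la (((PySem.List.pyGetD cs i ' ').toNat : Int) - 97) i)
      (PySem.List.pyRepeat [(-1 : Int)] 26)
    = (List.range 26).map (fun j => Li (cs.map clsC) j) := by
  rw [foldl_pyRange_len]
  simp only [PySem.List.pyGetD_natCast, PySem.List.pyRepeat_singleton]
  have hinit : (List.replicate (26 : Int).toNat (-1 : Int)).length = 26 := by simp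
  have hlen := table_fold_length ((0 : Int)) (fun k => (cs.getD k ' ').toNat)
      (fun _ k => (k : Int)) (List.range cs.length) (List.replicate (26 : Int).toNat (-1 : Int))
  apply List.ext_getElem
  · rw [hlen, hinit]; simp
  · intro j hj1 hj2
    have hj : j < 26 := by rw [hlen, hinit] at hj1; exact hj1
    have hk : ∀ k ∈ List.range cs.length, 71 ≤ (cs.getD k ' ').toNat ∧ (cs.getD k ' ').toNat ≤ 122 := by
      intro k hkm
      have hklt : k < cs.length := List.mem_range.mp hkm
      rw [List.getD_eq_getElem _ _ hklt]
      exact hpre _ (List.getElem_mem hklt)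
    have htf := table_fold ((0 : Int)) (fun k => (cs.getD k ' ').toNat)
        (fun _ k => (k : Int)) (List.range cs.length)
        (List.replicate (26 : Int).toNat (-1 : Int)) j hinit hj hk
    rw [← List.getD_eq_getElem _ ((0 : Int)) hj1, htf]
    have hinitD : (List.replicate (26 : Int).toNat (-1 : Int)).getD j (0 : Int) = -1 := by
      rw [List.getD_eq_getElem _ _ (by rw [hinit]; exact hj)]
      exact List.getElem_replicate _
    rw [hinitD]
    have hcongr := PySem.List.foldl_congr_mem
      (l := List.range cs.length)
      (f := fun (a : Int) (k : Nat) => if ((cs.getD k ' ').toNat - 71) % 26 = j then (k : Int) else a)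
      (g := fun (a : Int) (k : Nat) => if (cs.map clsC).getD k 0 = j then (k : Int) else a)
      (init := (-1 : Int))
      (by
        intro a k hkm
        have hklt : k < cs.length := List.mem_range.mp hkm
        show (if ((cs.getD k ' ').toNat - 71) % 26 = j then (k:Int) else a)
          = (if (cs.map clsC).getD k 0 = j then (k:Int) else a)
        rw [cl_getD cs hklt]
        unfold clsC
        rfl)
    rw [hcongr]
    have hset := setFold (cs.map clsC) j (cs.map clsC).length (le_refl _)
    rw [List.take_length] at hset
    have hlencl : cs.length = (cs.map clsC).length := by simp
    rw [hlencl, hset, List.getElem_map, List.getElem_range]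
    by_cases hmem : j ∈ cs.map clsC
    · simp only [hmem, if_true]
      unfold Li
      rfl
    · simp only [hmem, if_false]
      rw [Li_absent hmem]

-- ---- the sort: Python's lexicographic sort of the 26 pairs ----
lemma sorted2_eq_sorted_lex (xs : List (Int × Int)) :
    PySem.List.sorted2 xs (fun p => p.1) (fun p => p.2)
      = PySem.List.sorted xs (fun p : Int × Int => toLex p) false := by
  have hbf : (fun (a b : Int × Int) => decide (a.1 < b.1) || (!decide (b.1 < a.1) && decide (a.2 < b.2)))
      = (fun (a b : Int × Int) => decide (toLex a < toLex b)) := by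
    funext a b
    by_cases h1 : a.1 < b.1
    · simp [Prod.Lex.toLex_lt_toLex, h1]
    · by_cases h2 : b.1 < a.1
      · have hne : ¬ (a.1 = b.1) := ne_of_gt h2
        simp [Prod.Lex.toLex_lt_toLex, h1, h2, hne]
      · have he : a.1 = b.1 := le_antisymm (not_lt.mp h2) (not_lt.mp h1)
        by_cases h3 : a.2 < b.2 <;> simp [Prod.Lex.toLex_lt_toLex, h1, h2, h3, he]
  unfold PySem.List.sorted2 PySem.List.sorted
  simp only [Bool.false_eq_true, if_false, hbf]

lemma sseg_eq (cs : List Char) :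
    PySem.List.sorted2 ((List.range 26).map (tbl (cs.map clsC))) (fun p => p.1) (fun p => p.2)
      = Ilist (cs.map clsC)
        ++ List.replicate (26 - (PySem.List.dedup (cs.map clsC)).length)
            ((((cs.map clsC).length : Nat) : Int), -1) := by
  rw [sorted2_eq_sorted_lex]
  have hnodupD : (PySem.List.dedup (cs.map clsC)).Nodup := by
    rw [PySem.List.dedup_eq_ofList]; exact PySem.Set.nodup_ofList _
  have hfilter : ((List.range 26).filter
      (fun j => decide (j ∈ PySem.List.dedup (cs.map clsC)))).Perm
      (PySem.List.dedup (cs.map clsC)) := by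
    apply (List.perm_ext_iff_of_nodup (List.Nodup.filter _ (List.nodup_range)) hnodupD).mpr
    intro x
    simp only [List.mem_filter, List.mem_range, decide_eq_true_eq]
    constructor
    · exact fun h => h.2
    · exact fun h => ⟨cls_mem_lt (mem_dedup_mem h), h⟩
  have htot := (List.filter_append_perm
      (fun j => decide (j ∈ PySem.List.dedup (cs.map clsC))) (List.range 26)).length_eq
  have hrepl : ((List.range 26).filter
      (fun j => !decide (j ∈ PySem.List.dedup (cs.map clsC)))).map (tbl (cs.map clsC))
      = List.replicate (26 - (PySem.List.dedup (cs.map clsC)).length)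
          ((((cs.map clsC).length : Nat) : Int), -1) := by
    apply List.eq_replicate_iff.mpr
    constructor
    · rw [List.length_map]
      rw [List.length_append] at htot
      rw [hfilter.length_eq] at htot
      simp only [List.length_range] at htot
      omega
    · intro b hb
      obtain ⟨j, hjf, rfl⟩ := List.mem_map.mp hb
      have hjn : j ∉ cs.map clsC := by
        intro hc
        have := (List.mem_filter.mp hjf).2
        simp only [Bool.not_eq_true', decide_eq_false_iff_not] at this
        exact this (mem_mem_dedup hc)
      unfold tbl
      rw [Fi_absent hjn, Li_absent hjn]
  have hperm : ((List.range 26).map (tbl (cs.map clsC))).Perm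
      (Ilist (cs.map clsC)
        ++ List.replicate (26 - (PySem.List.dedup (cs.map clsC)).length)
            ((((cs.map clsC).length : Nat) : Int), -1)) := by
    have h1 := (List.filter_append_perm
        (fun j => decide (j ∈ PySem.List.dedup (cs.map clsC))) (List.range 26)).symm
    have h2 := h1.map (tbl (cs.map clsC))
    rw [List.map_append] at h2
    refine h2.trans (List.Perm.append ?_ ?_)
    · exact hfilter.map _
    · rw [hrepl]
  refine PySem.List.eq_of_perm_of_pairwise_le_of_injective
    (fun p : Int × Int => toLex p) (Equiv.injective toLex)
    ((PySem.List.sorted_perm _ _ _).trans hperm)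
    (PySem.List.sorted_pairwise _ _) ?_
  rw [List.pairwise_append]
  refine ⟨?_, pw_replicate (fun a b : Int × Int => toLex a ≤ toLex b) _ (le_refl _) _, ?_⟩
  · unfold Ilist
    refine List.Pairwise.map _ ?_ (dedup_pairwise_idxOf (cs.map clsC))
    intro a b hab
    apply le_of_lt
    rw [Prod.Lex.toLex_lt_toLex]
    left
    show Fi (cs.map clsC) a < Fi (cs.map clsC) b
    unfold Fi
    exact_mod_cast hab
  · intro a ha b hb
    rw [List.eq_of_mem_replicate hb]
    obtain ⟨j, hj, rfl⟩ := List.mem_map.mp ha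
    apply le_of_lt
    rw [Prod.Lex.toLex_lt_toLex]
    left
    exact Fi_lt_len (mem_dedup_mem hj)

-- ---- assembling the two ports ----
lemma Ilist_len (cl : List Nat) : (Ilist cl).length = (PySem.List.dedup cl).length := by
  unfold Ilist; simp

lemma dedup_len_le (cl : List Nat) (h : ∀ j ∈ cl, j < 26) :
    (PySem.List.dedup cl).length ≤ 26 := by
  have := nodup_length_le (l₂ := List.range 26)
    (by rw [PySem.List.dedup_eq_ofList]; exact PySem.Set.nodup_ofList _)
    (fun x hx => List.mem_range.mpr (h x (mem_dedup_mem hx)))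
  simpa using this

lemma coreA_eq (cs : List Char) (hpre : ∀ c ∈ cs, 71 ≤ c.toNat ∧ c.toNat ≤ 122)
    (hne : cs ≠ []) :
    getLongestSceneCore cs
      = (mergeRun (cs.map clsC) ((PySem.List.dedup (cs.map clsC)).length)).2.2 := by
  have hK26 : (PySem.List.dedup (cs.map clsC)).length ≤ 26 :=
    dedup_len_le _ (fun j hj => cls_mem_lt hj)
  have hIne : Ilist (cs.map clsC) ≠ [] := by
    unfold Ilist
    simp only [ne_eq, List.map_eq_nil_iff]
    exact dedup_ne_nil (by simpa using hne)
  obtain ⟨q0, Itl, hI0⟩ := List.exists_cons_of_ne_nil hIne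
  simp only [getLongestSceneCore]
  rw [segA_eq cs hpre, sseg_eq cs]
  simp only [List.length_map, PySem.List.len_eq]
  set E := List.replicate (26 - (PySem.List.dedup (cs.map clsC)).length)
      (((cs.length : Nat) : Int), (-1 : Int)) with hE
  have hlenIE : PySem.List.len (Ilist (cs.map clsC) ++ E) = 26 := by
    rw [PySem.List.len_eq]
    rw [List.length_append, Ilist_len, hE, List.length_replicate]
    push_cast
    omega
  have h26 : (26 : Int) = PySem.List.len (Ilist (cs.map clsC) ++ E) := hlenIE.symm
  rw [h26]
  have hloop := PySem.List.foldl_pyRange_pyGetD (Ilist (cs.map clsC) ++ E)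
      (((0:Int), (0:Int)))
      (f := fun (st : Int × Int × Int) (p : Int × Int) =>
        if p.1 < (cs.length : Int) ∧ 0 ≤ p.2 then
          if p.1 ≤ st.2.1 then
            (st.1, max st.2.1 p.2, max st.2.2 (max st.2.1 p.2 - st.1 + 1))
          else (p.1, p.2, max st.2.2 (p.2 - p.1 + 1))
        else st)
      (((PySem.List.pyGetD (Ilist (cs.map clsC) ++ E) 0 ((0:Int),(0:Int))).1,
        (PySem.List.pyGetD (Ilist (cs.map clsC) ++ E) 0 ((0:Int),(0:Int))).2,
        (PySem.List.pyGetD (Ilist (cs.map clsC) ++ E) 0 ((0:Int),(0:Int))).2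
          - (PySem.List.pyGetD (Ilist (cs.map clsC) ++ E) 0 ((0:Int),(0:Int))).1 + 1))
      (a := 0) (le_refl 0)
  rw [hloop, Int.toNat_zero, List.drop_zero]
  have hp0 : PySem.List.pyGetD (Ilist (cs.map clsC) ++ E) 0 ((0:Int),(0:Int))
      = (Ilist (cs.map clsC)).headD (0, 0) := by
    rw [hI0]
    simp [PySem.List.pyGetD_zero_cons]
  rw [List.foldl_append]
  have hIl : ∀ init : Int × Int × Int, (Ilist (cs.map clsC)).foldl (fun (st : Int × Int × Int) (p : Int × Int) =>
        if p.1 < (cs.length : Int) ∧ 0 ≤ p.2 then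
          if p.1 ≤ st.2.1 then
            (st.1, max st.2.1 p.2, max st.2.2 (max st.2.1 p.2 - st.1 + 1))
          else (p.1, p.2, max st.2.2 (p.2 - p.1 + 1))
        else st) init = (Ilist (cs.map clsC)).foldl mergeStep init := by
    intro init
    apply PySem.List.foldl_congr_mem
    intro st p hp
    obtain ⟨j, hj, rfl⟩ := List.mem_map.mp hp
    have hjm : j ∈ cs.map clsC := mem_dedup_mem hj
    have hcond : (tbl (cs.map clsC) j).1 < (cs.length : Int) ∧ 0 ≤ (tbl (cs.map clsC) j).2 := by
      constructor
      · have := Fi_lt_len hjm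
        simpa using this
      · exact Li_nonneg hjm
    rw [if_pos hcond]
    unfold mergeStep
    rfl
  have hEskip : ∀ (s : Int × Int × Int), E.foldl (fun (st : Int × Int × Int) (p : Int × Int) =>
        if p.1 < (cs.length : Int) ∧ 0 ≤ p.2 then
          if p.1 ≤ st.2.1 then
            (st.1, max st.2.1 p.2, max st.2.2 (max st.2.1 p.2 - st.1 + 1))
          else (p.1, p.2, max st.2.2 (p.2 - p.1 + 1))
        else st) s = s := by
    intro s
    apply foldl_fix
    intro s' x hx
    rw [hE] at hx
    rw [List.eq_of_mem_replicate hx]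
    rw [if_neg (by simp)]
  rw [hIl, hEskip, hp0]
  unfold mergeRun
  rw [← Ilist_len, List.take_length]

lemma coreB_eq (cs : List Char) (hpre : ∀ c ∈ cs, 71 ≤ c.toNat ∧ c.toNat ≤ 122) :
    getLongestSceneAltCore cs = (sweepRun (cs.map clsC) cs.length).1 := by
  simp only [getLongestSceneAltCore]
  rw [lastB_eq cs hpre, foldl_pyRange_len]
  have hfold : (List.range cs.length).foldl (fun (st : Int × Int × Int) (k : Nat) =>
        if (k : Int) = max st.2.2 (PySem.List.pyGetD ((List.range 26).map (fun j => Li (cs.map clsC) j))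
              (((PySem.List.pyGetD cs (k : Int) ' ').toNat : Int) - 97) 0) then
          (max st.1 ((k : Int) - st.2.1 + 1), (k : Int) + 1,
            max st.2.2 (PySem.List.pyGetD ((List.range 26).map (fun j => Li (cs.map clsC) j))
              (((PySem.List.pyGetD cs (k : Int) ' ').toNat : Int) - 97) 0))
        else (st.1, st.2.1,
          max st.2.2 (PySem.List.pyGetD ((List.range 26).map (fun j => Li (cs.map clsC) j))
              (((PySem.List.pyGetD cs (k : Int) ' ').toNat : Int) - 97) 0))
      ) ((0 : Int), (0 : Int), (0 : Int))
      = sweepRun (cs.map clsC) cs.length := by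
    unfold sweepRun
    apply PySem.List.foldl_congr_mem
    intro st k hk
    have hklt : k < cs.length := List.mem_range.mp hk
    have hLget : PySem.List.pyGetD ((List.range 26).map (fun j => Li (cs.map clsC) j))
        (((cs.getD k ' ').toNat : Int) - 97) 0 = lst (cs.map clsC) k := by
      rw [pyGetD_wrap _ (by simp) (hpre _ (by rw [List.getD_eq_getElem _ _ hklt]; exact List.getElem_mem hklt)).1
            (hpre _ (by rw [List.getD_eq_getElem _ _ hklt]; exact List.getElem_mem hklt)).2]
      rw [List.getD_eq_getElem _ _ (by simpa using clsC_lt (cs.getD k ' '))]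
      rw [List.getElem_map, List.getElem_range]
      unfold lst
      rw [cl_getD cs hklt]
      rfl
    simp only [PySem.List.pyGetD_natCast, hLget]
    unfold sweepStep
    rfl
  rw [hfold]
-- ---- the two runs, stepwise ----
lemma sweepRun_succ (cl : List Nat) (p : Nat) :
    sweepRun cl (p+1) = sweepStep cl (sweepRun cl p) p := by
  unfold sweepRun
  rw [List.range_succ, List.foldl_append]
  rfl

lemma mergeRun_succ (cl : List Nat) {m : Nat} (hm : m < (Ilist cl).length) :
    mergeRun cl (m+1) = mergeStep (mergeRun cl m) ((Ilist cl)[m]'hm) := by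
  unfold mergeRun
  rw [List.take_succ_eq_append_getElem hm, List.foldl_append]
  rfl

lemma sweep_en (cl : List Nat) :
    ∀ p, (sweepRun cl p).2.2 = (List.range p).foldl (fun a q => max a (lst cl q)) 0 := by
  intro p
  induction p with
  | zero => rfl
  | succ p ih =>
    rw [sweepRun_succ, List.range_succ, List.foldl_append]
    simp only [List.foldl_cons, List.foldl_nil]
    unfold sweepStep
    split <;> simp [ih]

lemma le_lst (cl : List Nat) {q : Nat} (hq : q < cl.length) : (q : Int) ≤ lst cl q := by
  unfold lst
  rw [List.getD_eq_getElem _ _ hq]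
  exact le_Li_of_getElem hq rfl

lemma lst_le (cl : List Nat) (q : Nat) : lst cl q ≤ (cl.length : Int) - 1 := Li_le _

-- ---- the main invariant: after p positions the sweep state matches the merge of the
-- ---- intervals of the classes seen so far ----
theorem invariant (cl : List Nat) (hne : cl ≠ []) : ∀ p, 1 ≤ p → p ≤ cl.length →
    ((mergeRun cl ((PySem.List.dedup (cl.take p)).length)).2.1 = (sweepRun cl p).2.2)
    ∧ ((mergeRun cl ((PySem.List.dedup (cl.take p)).length)).2.2
        = max (sweepRun cl p).1
            ((sweepRun cl p).2.2 - (mergeRun cl ((PySem.List.dedup (cl.take p)).length)).1 + 1))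
    ∧ ((sweepRun cl p).2.2 = (p : Int) - 1 →
          (sweepRun cl p).2.1 = (p : Int)
          ∧ (sweepRun cl p).1 = (mergeRun cl ((PySem.List.dedup (cl.take p)).length)).2.2)
    ∧ ((sweepRun cl p).2.2 ≠ (p : Int) - 1 →
          (sweepRun cl p).2.1 = (mergeRun cl ((PySem.List.dedup (cl.take p)).length)).1)
    ∧ ((p : Int) - 1 ≤ (sweepRun cl p).2.2) := by
  intro p
  induction p with
  | zero => intro h; omega
  | succ p ih =>
    intro _ hp2
    rcases Nat.eq_zero_or_pos p with hp0 | hp0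
    · -- base case: the first position
      subst hp0
      obtain ⟨c, t, rfl⟩ := List.exists_cons_of_ne_nil hne
      have htk1 : (c :: t).take (0+1) = [c] := rfl
      have hded1 : PySem.List.dedup [c] = [c] := by
        simp [PySem.List.dedup_eq_ofList, PySem.Set.ofList_eq_foldl, PySem.Set.add,
          PySem.Set.contains]
      obtain ⟨rest, hd⟩ : ∃ rest, PySem.List.dedup (c :: t) = c :: rest := by
        have hp := dedup_prefix [c] t
        rw [hded1] at hp
        obtain ⟨rest, hrest⟩ := hp
        exact ⟨rest, by simpa using hrest.symm⟩
      have hFi0 : Fi (c :: t) c = 0 := by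
        unfold Fi
        rw [List.idxOf_cons_self]
        rfl
      have hb0 : 0 ≤ Li (c :: t) c := Li_nonneg (by simp)
      have hM1 : mergeRun (c :: t) 1
          = mergeStep (Fi (c :: t) c, Li (c :: t) c,
              Li (c :: t) c - Fi (c :: t) c + 1) (Fi (c :: t) c, Li (c :: t) c) := by
        unfold mergeRun Ilist
        rw [hd]
        rfl
      have hM1' : mergeRun (c :: t) 1
          = (0, max (Li (c :: t) c) (Li (c :: t) c),
              max (Li (c :: t) c - 0 + 1) (max (Li (c :: t) c) (Li (c :: t) c) - 0 + 1)) := by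
        rw [hM1, hFi0]
        unfold mergeStep
        rw [if_pos (by simpa using hb0)]
      have hlst0 : lst (c :: t) 0 = Li (c :: t) c := rfl
      have hS1 : sweepRun (c :: t) (0+1) = sweepStep (c :: t) (0, 0, 0) 0 := by
        rw [sweepRun_succ]
        rfl
      rw [htk1, hded1]
      simp only [List.length_cons, List.length_nil]
      rw [hM1', hS1]
      unfold sweepStep
      rw [hlst0]
      dsimp only
      by_cases hc0 : (((0:Nat)) : Int) = max 0 (Li (c :: t) c)
      · rw [if_pos hc0]
        dsimp only
        push_cast at hc0
        refine ⟨by omega, by omega, ?_, by intro hcon; push_cast at hcon; omega, by push_cast; omega⟩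
        intro _
        constructor <;> push_cast <;> omega
      · rw [if_neg hc0]
        dsimp only
        push_cast at hc0
        refine ⟨by omega, by omega, ?_, by intro _; omega, by push_cast; omega⟩
        intro hcon
        push_cast at hcon
        omega
    · -- step case
      have hplen : p < cl.length := by omega
      obtain ⟨ha, hb, hc, hd, he⟩ := ih hp0 (by omega)
      rcases hS : sweepRun cl p with ⟨ans, st, en⟩
      rcases hM : mergeRun cl ((PySem.List.dedup (cl.take p)).length) with ⟨l, r, A⟩
      rw [hS] at ha hb hc hd he
      rw [hM] at ha hb hc hd
      dsimp only at ha hb hc hd he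
      have htk : cl.take (p+1) = cl.take p ++ [cl[p]] := List.take_succ_eq_append_getElem hplen
      have hlstp : (p : Int) ≤ lst cl p := le_lst cl hplen
      rw [sweepRun_succ, hS]
      by_cases hmem : cl[p] ∈ PySem.List.dedup (cl.take p)
      · -- a class seen before: the merge side does not move
        have hdd : PySem.List.dedup (cl.take (p+1)) = PySem.List.dedup (cl.take p) := by
          rw [htk, dedup_snoc, if_pos hmem]
        have hlst_le : lst cl p ≤ en := by
          obtain ⟨q, hq, hqe⟩ := List.mem_take_iff_getElem.mp (mem_dedup_mem hmem)
          have hqp : q < p := lt_of_lt_of_le hq (min_le_left _ _)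
          have hqlen : q < cl.length := lt_of_lt_of_le hq (min_le_right _ _)
          have hlq : lst cl p = lst cl q := by
            unfold lst
            rw [List.getD_eq_getElem _ _ hplen, List.getD_eq_getElem _ _ hqlen, hqe]
          have hen := sweep_en cl p
          rw [hS] at hen
          simp only [Prod.snd] at hen
          rw [hlq, hen]
          exact (PySem.List.le_foldl_max_int (List.range p) (lst cl) 0).2 q
            (List.mem_range.mpr hqp)
        have hmax : max en (lst cl p) = en := max_eq_left hlst_le
        have henp : (p : Int) ≤ en := le_trans hlstp hlst_le
        rw [hdd, hM]
        unfold sweepStep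
        dsimp only
        rw [hmax]
        by_cases hcut : (p : Int) = en
        · rw [if_pos hcut]
          have hst : st = l := hd (by omega)
          dsimp only
          refine ⟨by omega, by omega, ?_, ?_, by push_cast; omega⟩
          · intro _
            constructor
            · push_cast; omega
            · rw [hst]; omega
          · intro hcon
            push_cast at hcon
            omega
        · rw [if_neg hcut]
          have hst : st = l := hd (by omega)
          dsimp only
          refine ⟨by omega, by omega, ?_, fun _ => hst, by push_cast; omega⟩
          intro hcon
          push_cast at hcon
          omega
      · -- a new class: the merge side consumes the next interval
        have hnotin : cl[p] ∉ cl.take p := fun hx => hmem (mem_mem_dedup hx)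
        have hdd : PySem.List.dedup (cl.take (p+1))
            = PySem.List.dedup (cl.take p) ++ [cl[p]] := by
          rw [htk, dedup_snoc, if_neg hmem]
        have hm'len : (PySem.List.dedup (cl.take (p+1))).length
            = (PySem.List.dedup (cl.take p)).length + 1 := by
          rw [hdd]; simp
        have h3 := dedup_take_eq cl (p+1)
        have hm1K : (PySem.List.dedup (cl.take p)).length + 1
            ≤ (PySem.List.dedup cl).length := by
          have := congrArg List.length h3
          rw [hm'len] at this
          simp only [List.length_take] at this
          omega
        have hmI : (PySem.List.dedup (cl.take p)).length < (Ilist cl).length := by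
          rw [Ilist_len]; omega
        have hgetd : (PySem.List.dedup cl)[(PySem.List.dedup (cl.take p)).length]'(by omega)
            = cl[p] := by
          have h2 := dedup_take_eq cl p
          have h4 := List.take_succ_eq_append_getElem
            (l := PySem.List.dedup cl) (i := (PySem.List.dedup (cl.take p)).length) (by omega)
          have h3' := h3
          rw [hm'len] at h3'
          rw [hdd, h4, ← h2] at h3'
          have := List.append_cancel_left h3'
          simpa using this.symm
        have hIm : (Ilist cl)[(PySem.List.dedup (cl.take p)).length]'hmI
            = tbl cl (cl[p]) := by
          unfold Ilist
          rw [List.getElem_map]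
          rw [hgetd]
        have hFi : Fi cl (cl[p]) = (p : Int) := by
          unfold Fi
          rw [idxOf_eq_of_not_mem_take hplen rfl hnotin]
        have hlstb : lst cl p = Li cl (cl[p]) := by
          unfold lst
          rw [List.getD_eq_getElem _ _ hplen]
        have hpb : (p : Int) ≤ Li cl (cl[p]) := by rw [← hlstb]; exact hlstp
        rw [hm'len, mergeRun_succ cl hmI, hIm, hM]
        have htbl : tbl cl (cl[p]) = ((p : Int), Li cl (cl[p])) := by
          unfold tbl
          rw [hFi]
        rw [htbl]
        unfold mergeStep sweepStep
        dsimp only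
        rw [hlstb]
        by_cases hprev : en = (p : Int) - 1
        · obtain ⟨hst, hansA⟩ := hc hprev
          rw [if_neg (by omega)]
          by_cases hcut : (p : Int) = max en (Li cl (cl[p]))
          · rw [if_pos hcut]
            dsimp only
            refine ⟨by omega, by omega, ?_, ?_, by push_cast; omega⟩
            · intro _
              constructor
              · push_cast; omega
              · rw [hst]; omega
            · intro hcon
              push_cast at hcon
              omega
          · rw [if_neg hcut]
            dsimp only
            refine ⟨by omega, by omega, ?_, fun _ => by rw [hst], by push_cast; omega⟩
            intro hcon
            push_cast at hcon
            omega
        · have hst : st = l := hd hprev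
          have henp : (p : Int) ≤ en := by omega
          rw [if_pos (by omega : (p : Int) ≤ r)]
          by_cases hcut : (p : Int) = max en (Li cl (cl[p]))
          · rw [if_pos hcut]
            dsimp only
            refine ⟨by omega, by omega, ?_, ?_, by push_cast; omega⟩
            · intro _
              constructor
              · push_cast; omega
              · rw [hst]; omega
            · intro hcon
              push_cast at hcon
              omega
          · rw [if_neg hcut]
            dsimp only
            refine ⟨by omega, by omega, ?_, fun _ => hst, by push_cast; omega⟩
            intro hcon
            push_cast at hcon
            omega

lemma foldl_max_le (f : Nat → Int) (B : Int) :
    ∀ p, 0 ≤ B → (∀ q, q < p → f q ≤ B) →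
      (List.range p).foldl (fun a q => max a (f q)) 0 ≤ B := by
  intro p
  induction p with
  | zero => intro hB _; simpa using hB
  | succ p ih =>
    intro hB hf
    rw [List.range_succ, List.foldl_append]
    simp only [List.foldl_cons, List.foldl_nil]
    have h1 := ih hB (fun q hq => hf q (by omega))
    have h2 := hf p (by omega)
    omega

theorem merge_eq_sweep (cl : List Nat) (hne : cl ≠ []) :
    (mergeRun cl (PySem.List.dedup cl).length).2.2 = (sweepRun cl cl.length).1 := by
  have hlen1 : 1 ≤ cl.length := List.length_pos_of_ne_nil hne
  obtain ⟨ha, hb, hc, hd, he⟩ := invariant cl hne cl.length hlen1 (le_refl _)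
  rw [List.take_length] at ha hb hc hd
  have htop : (sweepRun cl cl.length).2.2 ≤ (cl.length : Int) - 1 := by
    rw [sweep_en]
    exact foldl_max_le (lst cl) _ cl.length (by push_cast; omega) (fun q _ => lst_le cl q)
  exact ((hc (by omega)).2).symm

-- ===== VERDICT (by name: the statement is the Claim_ definition above) =====
theorem getLongestScene_spec : Claim_equal_getLongestScene := by
  intro str _ hpre
  unfold Pre_getLongestScene at hpre
  rw [List.all_eq_true] at hpre
  have hpre2 : ∀ c ∈ str.toList, 71 ≤ c.toNat ∧ c.toNat ≤ 122 := by
    intro c hc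
    have := hpre c hc
    simp at this
    omega
  unfold Spec_getLongestScene getLongestScene getLongestScene_alt
  rcases hcs : str.toList with _ | ⟨c, t⟩
  · decide
  · rw [hcs] at hpre2
    have hpre := hpre2
    rw [coreA_eq _ hpre (by simp), coreB_eq _ hpre]
    have hne : (c :: t).map clsC ≠ [] := by simp
    have hlen : (c :: t).length = ((c :: t).map clsC).length := by simp
    rw [hlen, merge_eq_sweep _ hne]
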